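-- pv_equiv track=rewrite | github.com/SvyatoslavDrozdov/algorithms | yandex_algorithm_training_3/lecture_1/contest/26_the_cheapest_way.py | is_possible_to_pass
-- ===== SOURCE A (Python) =====
-- def calculate_constants(value_of_squares: list[list[int]]) -> tuple[int, int, int, int]:
--     height: int = len(value_of_squares)
--     width: int = len(value_of_squares[0])
--
--     MAX_SQUARE_COST: int = 100
--     MAX_WAY_COST: int = MAX_SQUARE_COST * (height + width - 1)
--     INFTY: int = MAX_WAY_COST + 1
--
--     return height, width, INFTY, MAX_WAY_COST
--
-- def is_possible_to_pass(initial_money: int, value_of_squares: list[list[int]]) -> bool: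
--     height, width, INFTY, MAX_WAY_COST = calculate_constants(value_of_squares)
--
--     board_cost: list[list[int]] = [[0] * (width + 1)]
--     for row_idx in range(height):
--         board_cost.append([0] + value_of_squares[row_idx])
--
--     dp: list[list[int]] = [[INFTY] * (width + 1) for _ in range(height + 1)]
--     dp[0][1], dp[1][0] = 0, 0
--     for raw_number in range(1, height + 1):
--         for column_number in range(1, width + 1):
--             dp[raw_number][column_number] = (min(dp[raw_number - 1][column_number], dp[raw_number][column_number - 1]) +
--                                              board_cost[raw_number][column_number]
--                                              )
--             if initial_money - dp[raw_number][column_number] < 0: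
--                 dp[raw_number][column_number] = INFTY
--
--     return dp[height][width] < INFTY
-- ===== SOURCE B (Python) =====
-- def is_possible_to_pass(initial_money, value_of_squares):
--     # Top-down memoized recursion over 1-based cells instead of bottom-up
--     # table filling: cost(r, c) is demanded from the goal cell.
--     height = len(value_of_squares)
--     width = len(value_of_squares[0])
--     INFTY = 100 * (height + width - 1) + 1
--     memo = {}
--
--     def cost(r, c):
--         if (r, c) == (0, 1) or (r, c) == (1, 0):
--             return 0
--         if r == 0 or c == 0:
--             return INFTY
--         if (r, c) not in memo:
--             t = min(cost(r - 1, c), cost(r, c - 1)) + value_of_squares[r - 1][c - 1]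
--             if t > initial_money:
--                 t = INFTY
--             memo[(r, c)] = t
--         return memo[(r, c)]
--
--     return cost(height, width) < INFTY
-- ===== Notes on version B (the rewrite author's own statement) =====
-- stated objective: alternative
-- what changed: Replaces A's bottom-up filling of a padded (height+1)x(width+1) dp table (plus a padded cost board) by two nested index loops with a top-down memoized recursion cost(r,c) demanded from the goal cell, the virtual boundary expressed as base cases instead of pre-seeded table rows.
import Mathlib
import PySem

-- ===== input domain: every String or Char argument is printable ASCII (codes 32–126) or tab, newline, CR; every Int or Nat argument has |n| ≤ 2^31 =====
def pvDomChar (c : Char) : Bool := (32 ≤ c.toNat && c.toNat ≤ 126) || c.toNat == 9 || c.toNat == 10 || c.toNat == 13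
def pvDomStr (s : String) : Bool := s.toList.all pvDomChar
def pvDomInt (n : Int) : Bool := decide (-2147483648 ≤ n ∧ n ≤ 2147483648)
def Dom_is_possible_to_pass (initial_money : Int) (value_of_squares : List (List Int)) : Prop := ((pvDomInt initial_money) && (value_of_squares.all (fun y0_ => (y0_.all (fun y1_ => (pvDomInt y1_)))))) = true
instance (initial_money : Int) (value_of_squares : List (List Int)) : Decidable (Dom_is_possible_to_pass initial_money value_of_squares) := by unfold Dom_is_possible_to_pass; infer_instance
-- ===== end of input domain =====

-- B replaces A's bottom-up filling of a padded (height+1)×(width+1) dp table by a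
-- top-down memoized recursion demanded from the goal cell; equal return values on Pre_.

-- ===== PORT A =====
-- mutable-matrix primitives: m[r][c] read and m[r][c] = v write of A's list-of-lists
def pvGetCell (m : List (List Int)) (r c : Nat) : Int := (m.getD r []).getD c 0
def pvSetCell (m : List (List Int)) (r c : Nat) (v : Int) : List (List Int) :=
  m.set r ((m.getD r []).set c v)

-- body of A's inner loop (raw_number = r fixed, c' = column_number - 1)
def pvAInner (money I : Int) (board : List (List Int)) (r : Nat)
    (dp : List (List Int)) (c' : Nat) : List (List Int) :=
  let c := c' + 1
  let v := min (pvGetCell dp (r - 1) c) (pvGetCell dp r (c - 1)) + pvGetCell board r c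
  let v2 := if money - v < 0 then I else v
  pvSetCell dp r c v2

def is_possible_to_pass (initial_money : Int) (value_of_squares : List (List Int)) : Bool :=
  let height := value_of_squares.length
  let width := (value_of_squares.headD []).length
  let INFTY : Int := 100 * ((height : Int) + (width : Int) - 1) + 1
  let board_cost : List (List Int) :=
    List.replicate (width + 1) 0 :: value_of_squares.map (fun row => 0 :: row)
  let dp0 := List.replicate (height + 1) (List.replicate (width + 1) INFTY)
  let dp1 := pvSetCell (pvSetCell dp0 0 1 0) 1 0 0
  let dpF := (List.range height).foldl
    (fun dp r' => (List.range width).foldl (pvAInner initial_money INFTY board_cost (r' + 1)) dp) dp1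
  decide (pvGetCell dpF height width < INFTY)

-- ===== PORT B =====
-- B's inner helper cost(r, c): returns the value together with the updated memo dict
def pvBCost (money I : Int) (g : List (List Int)) :
    Nat → Nat → PySem.Dict (Nat × Nat) Int → Int × PySem.Dict (Nat × Nat) Int
  | r, c, memo =>
    if (r = 0 ∧ c = 1) ∨ (r = 1 ∧ c = 0) then (0, memo)
    else if r = 0 ∨ c = 0 then (I, memo)
    else
      match memo.get? (r, c) with
      | some v => (v, memo)
      | none =>
        let p := pvBCost money I g (r - 1) c memo
        let q := pvBCost money I g r (c - 1) p.2
        let t := min p.1 q.1 + ((g.getD (r - 1) []).getD (c - 1) 0)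
        let t2 := if t > money then I else t
        (t2, q.2.insert (r, c) t2)
  termination_by r c _ => r + c
  decreasing_by all_goals omega

def is_possible_to_pass_alt (initial_money : Int) (value_of_squares : List (List Int)) : Bool :=
  let height := value_of_squares.length
  let width := (value_of_squares.headD []).length
  let INFTY : Int := 100 * ((height : Int) + (width : Int) - 1) + 1
  decide ((pvBCost initial_money INFTY value_of_squares height width PySem.Dict.empty).1 < INFTY)

-- ===== PRECONDITION & SPEC =====
-- Pre_ excludes exactly the inputs where A raises IndexError: the empty grid, an empty first
-- row, and ragged grids having a row shorter than the first row.
def Pre_is_possible_to_pass (initial_money : Int) (value_of_squares : List (List Int)) : Prop :=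
  value_of_squares ≠ [] ∧ (value_of_squares.headD []) ≠ [] ∧
    ∀ row ∈ value_of_squares, (value_of_squares.headD []).length ≤ row.length
instance (initial_money : Int) (value_of_squares : List (List Int)) : Decidable (Pre_is_possible_to_pass initial_money value_of_squares) := by unfold Pre_is_possible_to_pass; infer_instance

def pvWitness_is_possible_to_pass : Int × List (List Int) := (5, [[1, 2], [3, 4]])

def Spec_is_possible_to_pass (initial_money : Int) (value_of_squares : List (List Int)) (out : Bool) : Prop := out = is_possible_to_pass_alt initial_money value_of_squares
instance (initial_money : Int) (value_of_squares : List (List Int)) (out : Bool) : Decidable (Spec_is_possible_to_pass initial_money value_of_squares out) := by unfold Spec_is_possible_to_pass; infer_instance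

-- ===== CLAIM (what is proved, stated in full; the proofs are below) =====
def Claim_equal_is_possible_to_pass : Prop := ∀ (initial_money : Int) (value_of_squares : List (List Int)), Dom_is_possible_to_pass initial_money value_of_squares → Pre_is_possible_to_pass initial_money value_of_squares → Spec_is_possible_to_pass initial_money value_of_squares (is_possible_to_pass initial_money value_of_squares)

-- ===== LEMMAS AND PROOFS =====

-- the shared recurrence, as a pure function of the cell
def pvPure (money I : Int) (g : List (List Int)) : Nat → Nat → Int
  | r, c =>
    if (r = 0 ∧ c = 1) ∨ (r = 1 ∧ c = 0) then 0
    else if r = 0 ∨ c = 0 then I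
    else
      let t := min (pvPure money I g (r - 1) c) (pvPure money I g r (c - 1))
               + ((g.getD (r - 1) []).getD (c - 1) 0)
      if t > money then I else t
  termination_by r c => r + c
  decreasing_by all_goals omega

-- a dict is good when every stored value is the pure recurrence's value at its key
def pvGood (money I : Int) (g : List (List Int)) (d : PySem.Dict (Nat × Nat) Int) : Prop :=
  ∀ r c v, d.get? (r, c) = some v → v = pvPure money I g r c

-- B side: with a good memo, cost returns the pure value and keeps the memo good
lemma pvBCost_correct (m I : Int) (g : List (List Int)) :
    ∀ n r c memo, r + c ≤ n → pvGood m I g memo →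
      (pvBCost m I g r c memo).1 = pvPure m I g r c ∧
        pvGood m I g (pvBCost m I g r c memo).2 := by
  intro n
  induction n with
  | zero =>
    intro r c memo hn hg
    have hr : r = 0 := by omega
    have hc : c = 0 := by omega
    subst hr; subst hc
    rw [pvBCost]
    refine ⟨?_, by simpa using hg⟩
    rw [pvPure]
    simp
  | succ n ih =>
    intro r c memo hn hg
    rw [pvBCost]
    by_cases h1 : (r = 0 ∧ c = 1) ∨ (r = 1 ∧ c = 0)
    · rw [if_pos h1]
      exact ⟨by rw [pvPure]; simp [h1], hg⟩
    · by_cases h2 : r = 0 ∨ c = 0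
      · rw [if_neg h1, if_pos h2]
        refine ⟨?_, hg⟩
        rw [pvPure]
        simp [h1, h2]
      · rw [if_neg h1, if_neg h2]
        cases hget : memo.get? (r, c) with
        | some v => exact ⟨hg r c v hget, hg⟩
        | none =>
          obtain ⟨hp1, hp2⟩ := ih (r - 1) c memo (by omega) hg
          obtain ⟨hq1, hq2⟩ := ih r (c - 1) (pvBCost m I g (r - 1) c memo).2 (by omega) hp2
          dsimp only
          constructor
          · conv_rhs => rw [pvPure]
            simp only [h1, h2, if_false]
            rw [hp1, hq1]
          · intro r' c' v' hv'
            rcases eq_or_ne ((r', c') : Nat × Nat) (r, c) with he | he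
            · obtain ⟨hr', hc'⟩ := Prod.mk.inj he
              rw [he, PySem.Dict.get?_insert_self] at hv'
              injection hv' with hv''
              subst hr'; subst hc'
              rw [← hv'']
              conv_rhs => rw [pvPure]
              simp only [h1, h2, if_false]
              rw [hp1, hq1]
            · rw [PySem.Dict.get?_insert_of_ne _ _ he] at hv'
              exact hq2 r' c' v' hv'

-- the full pure row r as a list, indices 0..W
def pvRowOf (money I : Int) (g : List (List Int)) (W r : Nat) : List Int :=
  (List.range (W + 1)).map (pvPure money I g r)

-- A side, inner loop: filling row r left to right computes the pure values
lemma pvInner_char (m I : Int) (g board : List (List Int)) (W : Nat) (r : Nat) (hr : 1 ≤ r)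
    (hb : board.getD r [] = 0 :: g.getD (r - 1) []) :
    ∀ n s dp, s + n = W + 1 → 1 ≤ s → r < dp.length →
      dp.getD (r - 1) [] = pvRowOf m I g W (r - 1) →
      dp.getD r [] = (List.range s).map (pvPure m I g r) ++ List.replicate n I →
      (List.range' (s - 1) n).foldl (pvAInner m I board r) dp
        = dp.set r (pvRowOf m I g W r) := by
  intro n
  induction n with
  | zero =>
    intro s dp hsn hs hrlen hup hrow
    have hs' : s = W + 1 := by omega
    simp only [List.range'_zero, List.foldl_nil]
    have : dp.getD r [] = pvRowOf m I g W r := by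
      rw [hrow, hs']; simp [pvRowOf]
    apply List.ext_getElem?
    intro i
    by_cases hi : i = r
    · subst hi
      rw [List.getElem?_set_self hrlen, ← this]
      simp [List.getD_eq_getElem?_getD, List.getElem?_eq_getElem hrlen]
    · rw [List.getElem?_set_ne (by omega)]
  | succ n ih =>
    intro s dp hsn hs hrlen hup hrow
    have hsW : s ≤ W := by omega
    -- the reads of this iteration
    have hup' : pvGetCell dp (r - 1) s = pvPure m I g (r - 1) s := by
      rw [pvGetCell, hup, pvRowOf, List.getD_eq_getElem?_getD, List.getElem?_map]
      rw [List.getElem?_range (by omega)]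
      rfl
    have hleft : pvGetCell dp r (s - 1) = pvPure m I g r (s - 1) := by
      rw [pvGetCell, hrow, List.getD_eq_getElem?_getD,
        List.getElem?_append_left (by simp; omega), List.getElem?_map,
        List.getElem?_range (by omega)]
      rfl
    have hbv : pvGetCell board r s = (g.getD (r - 1) []).getD (s - 1) 0 := by
      rw [pvGetCell, hb]
      rcases Nat.exists_eq_add_of_le hs with ⟨k, hk⟩
      subst hk
      simp [Nat.add_comm]
    -- the written value is the pure value at (r, s)
    have hwrite : (if m - (min (pvGetCell dp (r - 1) s) (pvGetCell dp r (s - 1)) + pvGetCell board r s) < 0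
          then I else min (pvGetCell dp (r - 1) s) (pvGetCell dp r (s - 1)) + pvGetCell board r s)
        = pvPure m I g r s := by
      rw [hup', hleft, hbv]
      conv_rhs => rw [pvPure]
      have h1 : ¬ ((r = 0 ∧ s = 1) ∨ (r = 1 ∧ s = 0)) := by
        rintro (⟨h, _⟩ | ⟨_, h⟩) <;> omega
      have h2 : ¬ (r = 0 ∨ s = 0) := by rintro (h | h) <;> omega
      simp only [h1, h2, if_false]
      split_ifs <;> first | rfl | omega
    -- the step rewrites row r
    have hstep : pvAInner m I board r dp (s - 1)
        = dp.set r ((List.range (s + 1)).map (pvPure m I g r) ++ List.replicate n I) := by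
      simp only [pvAInner, pvSetCell]
      have hc : s - 1 + 1 = s := by omega
      rw [hc, hwrite, hrow]
      rw [List.set_append_right _ _ (by simp)]
      simp only [List.length_map, List.length_range]
      rw [Nat.sub_self, List.replicate_succ, List.set_cons_zero, List.range_succ]
      simp
    rw [List.range'_succ, List.foldl_cons, hstep]
    have hsel : (dp.set r ((List.range (s + 1)).map (pvPure m I g r) ++ List.replicate n I)).getD r []
        = (List.range (s + 1)).map (pvPure m I g r) ++ List.replicate n I := by
      simp [List.getD_eq_getElem?_getD, List.getElem?_set_self (by simpa using hrlen)]
    have hih := ih (s + 1) (dp.set r ((List.range (s + 1)).map (pvPure m I g r) ++ List.replicate n I))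
      (by omega) (by omega) (by simpa using hrlen)
      (by rw [List.getD_eq_getElem?_getD, List.getElem?_set_ne (by omega),
          ← List.getD_eq_getElem?_getD, hup])
      hsel
    rw [show s - 1 + 1 = s + 1 - 1 from by omega, hih, List.set_set]

-- A side, outer loop: after all rows, row H holds the pure values
lemma pvOuter_char (m I : Int) (g board : List (List Int)) (W H : Nat) (hW : 1 ≤ W)
    (hball : ∀ r, 1 ≤ r → r ≤ H → board.getD r [] = 0 :: g.getD (r - 1) []) :
    ∀ n k dp, k + n = H → dp.length = H + 1 →
      dp.getD k [] = pvRowOf m I g W k →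
      (∀ j, k < j → j ≤ H → dp.getD j [] = pvPure m I g j 0 :: List.replicate W I) →
      ((List.range' k n).foldl
          (fun dp r' => (List.range W).foldl (pvAInner m I board (r' + 1)) dp) dp).getD H []
        = pvRowOf m I g W H := by
  intro n
  induction n with
  | zero =>
    intro k dp hkn hlen hrow _
    have : k = H := by omega
    subst this
    simpa using hrow
  | succ n ih =>
    intro k dp hkn hlen hrow hrest
    rw [List.range'_succ, List.foldl_cons]
    have hfirst : (List.range W).foldl (pvAInner m I board (k + 1)) dp
        = dp.set (k + 1) (pvRowOf m I g W (k + 1)) := by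
      have hg1 : (1 : Nat) + W = W + 1 := by omega
      have hg2 : (1 : Nat) ≤ 1 := le_refl 1
      have hg3 : k + 1 < dp.length := by omega
      have := pvInner_char m I g board W (k + 1) (by omega)
        (by simpa using hball (k + 1) (by omega) (by omega))
        W 1 dp hg1 hg2 hg3
        (by simpa using hrow)
        (by
          have := hrest (k + 1) (by omega) (by omega)
          rw [this]
          simp [List.range_succ])
      rw [List.range_eq_range']
      simpa using this
    rw [hfirst]
    exact ih (k + 1) _ (by omega) (by simpa using hlen)
      (by
        rw [List.getD_eq_getElem?_getD,
          List.getElem?_set_self (by omega)]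
        rfl)
      (by
        intro j hj1 hj2
        rw [List.getD_eq_getElem?_getD, List.getElem?_set_ne (by omega),
          ← List.getD_eq_getElem?_getD]
        exact hrest j (by omega) hj2)

-- main equivalence
lemma pv_main (m : Int) (g : List (List Int)) (hne : g ≠ [])
    (hfe : (g.headD []) ≠ []) :
    is_possible_to_pass m g = is_possible_to_pass_alt m g := by
  have hW : 1 ≤ (g.headD []).length := List.length_pos_iff.mpr hfe
  have hH : 1 ≤ g.length := List.length_pos_iff.mpr hne
  simp only [is_possible_to_pass, is_possible_to_pass_alt]
  set W := (g.headD []).length with hWdef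
  set H := g.length with hHdef
  set I : Int := 100 * ((H : Int) + (W : Int) - 1) + 1 with hIdef
  set board := (List.replicate (W + 1) (0 : Int)) :: g.map (fun row => (0 : Int) :: row) with hboarddef
  set dp1 := pvSetCell (pvSetCell (List.replicate (H + 1) (List.replicate (W + 1) I)) 0 1 0) 1 0 0 with hdp1
  -- B computes the pure value
  have hB : (pvBCost m I g H W PySem.Dict.empty).1 = pvPure m I g H W :=
    (pvBCost_correct m I g (H + W) H W PySem.Dict.empty (le_refl _)
      (by intro r c v hv; simp [PySem.Dict.get?_empty] at hv)).1
  -- initial rows of dp1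
  have hdp1get0 : dp1.getD 0 [] = (List.replicate (W + 1) I).set 1 0 := by
    rw [hdp1]
    simp only [pvSetCell]
    rw [List.getD_eq_getElem?_getD, List.getElem?_set_ne (by omega),
      List.getElem?_set_self (by simp)]
    rw [List.getD_eq_getElem?_getD, List.getElem?_replicate, if_pos (by omega)]
    rfl
  have hdp1get1 : dp1.getD 1 [] = (List.replicate (W + 1) I).set 0 0 := by
    rw [hdp1]
    simp only [pvSetCell]
    rw [List.getD_eq_getElem?_getD, List.getElem?_set_self (by simp; omega)]
    rw [List.getD_eq_getElem?_getD, List.getElem?_set_ne (by omega),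
      List.getElem?_replicate, if_pos (by omega)]
    rfl
  have hdp1getj : ∀ j, 2 ≤ j → j < H + 1 → dp1.getD j [] = List.replicate (W + 1) I := by
    intro j h2 hj
    rw [hdp1]
    simp only [pvSetCell]
    rw [List.getD_eq_getElem?_getD, List.getElem?_set_ne (by omega),
      List.getElem?_set_ne (by omega), List.getElem?_replicate, if_pos hj]
    rfl
  -- row 0 is already the pure row 0
  have hrow0 : dp1.getD 0 [] = pvRowOf m I g W 0 := by
    rw [hdp1get0]
    apply List.ext_getElem
    · simp [pvRowOf]
    intro i hi1 hi2
    simp only [List.length_set, List.length_replicate] at hi1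
    simp only [pvRowOf]
    rw [List.getElem_map, List.getElem_range]
    by_cases h1 : i = 1
    · subst h1
      rw [List.getElem_set_self (by simpa using hi1)]
      rw [pvPure]; simp
    · rw [List.getElem_set_ne (by omega)]
      rw [List.getElem_replicate, pvPure]
      have : ¬ ((0 = 0 ∧ i = 1) ∨ ((0 : Nat) = 1 ∧ i = 0)) := by
        rintro (⟨_, h⟩ | ⟨h, _⟩) <;> omega
      simp
      exact fun h => absurd h h1
  -- rows 1..H start as pure(j,0) :: replicate W I
  have hrest : ∀ j, 0 < j → j ≤ H → dp1.getD j [] = pvPure m I g j 0 :: List.replicate W I := by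
    intro j hj1 hj2
    by_cases h1 : j = 1
    · subst h1
      rw [hdp1get1, List.replicate_succ, List.set_cons_zero]
      rw [pvPure]; simp
    · rw [hdp1getj j (by omega) (by omega), List.replicate_succ]
      rw [pvPure]
      have : ¬ ((j = 0 ∧ (0 : Nat) = 1) ∨ (j = 1 ∧ (0 : Nat) = 0)) := by
        rintro (⟨h, _⟩ | ⟨h, _⟩) <;> omega
      simp
      exact fun h => absurd h h1
  -- board rows
  have hball : ∀ r, 1 ≤ r → r ≤ H → board.getD r [] = 0 :: g.getD (r - 1) [] := by
    intro r h1 h2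
    rcases Nat.exists_eq_add_of_le h1 with ⟨k, hk⟩
    subst hk
    rw [hboarddef]
    simp only [Nat.add_comm 1 k, List.getD_cons_succ, Nat.add_sub_cancel]
    rw [List.getD_eq_getElem?_getD, List.getElem?_map,
      List.getElem?_eq_getElem (by omega), List.getD_eq_getElem?_getD,
      List.getElem?_eq_getElem (by omega)]
    rfl
  have houter := pvOuter_char m I g board W H hW hball H 0 dp1 (by omega)
    (by rw [hdp1]; simp [pvSetCell])
    hrow0
    (fun j hj1 hj2 => hrest j hj1 hj2)
  rw [← List.range_eq_range'] at houter
  have hkey : pvGetCell ((List.range H).foldl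
      (fun dp r' => (List.range W).foldl (pvAInner m I board (r' + 1)) dp) dp1) H W
      = pvPure m I g H W := by
    rw [pvGetCell, houter, pvRowOf, List.getD_eq_getElem?_getD, List.getElem?_map,
      List.getElem?_range (by omega)]
    rfl
  rw [hkey, hB]

-- ===== VERDICT (by name: the statement is the Claim_ definition above) =====
theorem is_possible_to_pass_spec : Claim_equal_is_possible_to_pass := by
  intro m g _ hpre
  obtain ⟨hne, hfe, _⟩ := hpre
  unfold Spec_is_possible_to_pass
  exact pv_main m g hne hfe
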